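-- pv_equiv track=rewrite | github.com/songhee-lee/2023-python-coding-test | Programmers/08. 불량 사용자.py | solution
-- ===== SOURCE A (Python) =====
-- from itertools import combinations, permutations
--
-- def solution(user_id, banned_id):
--     answer = 0
--     def check_is_banned(user):
--         for banned in banned_id:
--             check = True
--             if len(user) != len(banned):
--                 continue
--             for i in range(len(user)):
--                 if banned[i] == '*':
--                     continue
--                 if banned[i] != user[i]:
--                     check = False
--                     break
--             if check:
--                 return True
--
--         return False
--
--     user_combinations = combinations(user_id, len(banned_id))
--
--     banned_list = []
--     for user_combination in list(user_combinations):
--         result = all([check_is_banned(user) for user in user_combination])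
--         if result:
--             users = set(user_combination)
--             if users not in banned_list:
--                 banned_list.append(users)
--
--     return len(banned_list)
-- ===== SOURCE B (Python) =====
-- from itertools import combinations
--
-- def solution(user_id, banned_id):
--     def matches(user):
--         return any(
--             len(user) == len(b) and all(bc == '*' or bc == uc for bc, uc in zip(b, user))
--             for b in banned_id
--         )
--     valid = [u for u in user_id if matches(u)]
--     return len({tuple(sorted(set(c))) for c in combinations(valid, len(banned_id))})
-- ===== Notes on version B (the rewrite author's own statement) =====
-- stated objective: alternative
-- what changed: B hoists the banned-pattern check out of the combination loop (filtering valid users once, so only combinations of valid users are enumerated) and deduplicates by a set of canonical sorted tuples instead of A's linear scan over a list of sets.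
import Mathlib
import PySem

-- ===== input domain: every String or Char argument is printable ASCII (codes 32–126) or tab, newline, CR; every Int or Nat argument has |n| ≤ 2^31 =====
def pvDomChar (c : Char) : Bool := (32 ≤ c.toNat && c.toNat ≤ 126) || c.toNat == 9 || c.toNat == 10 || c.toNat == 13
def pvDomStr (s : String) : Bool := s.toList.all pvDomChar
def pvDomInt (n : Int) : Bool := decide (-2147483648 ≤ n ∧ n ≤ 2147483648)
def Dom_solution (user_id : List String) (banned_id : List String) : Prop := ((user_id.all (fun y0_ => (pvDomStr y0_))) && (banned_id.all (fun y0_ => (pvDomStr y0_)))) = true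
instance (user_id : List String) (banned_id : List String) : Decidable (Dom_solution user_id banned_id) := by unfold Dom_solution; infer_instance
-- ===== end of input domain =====

-- B checks each user against the banned patterns once up front (so only combinations of
-- valid users are enumerated) and deduplicates via a set of canonical sorted tuples; objective: alternative.

-- ===== PORT A =====
-- inner 'for i in range(len(user))' loop of check_is_banned (break/continue semantics)
def checkInnerA : List Char → List Char → Bool
  | bc :: bs, uc :: us =>
      if bc = '*' then checkInnerA bs us
      else if bc ≠ uc then false
      else checkInnerA bs us
  | _, _ => true

-- 'for banned in banned_id' loop of check_is_banned
def checkIsBanned (banned_id : List String) (user : String) : Bool :=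
  match banned_id with
  | [] => false
  | b :: rest =>
      if PySem.Str.len user ≠ PySem.Str.len b then checkIsBanned rest user
      else if checkInnerA b.toList user.toList then true
      else checkIsBanned rest user

def solution (user_id : List String) (banned_id : List String) : Int :=
  let user_combinations := PySem.List.combinations user_id banned_id.length
  let banned_list := user_combinations.foldl
    (fun bl user_combination =>
      if user_combination.all (fun user => checkIsBanned banned_id user) then
        let users : PySem.Set String := PySem.Set.ofList user_combination
        if bl.any (fun s => PySem.Set.equal s users) then bl else bl ++ [users]
      else bl)
    ([] : List (PySem.Set String))
  (banned_list.length : Int)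

-- ===== PORT B =====
def matchesB (banned_id : List String) (user : String) : Bool :=
  banned_id.any (fun b =>
    PySem.Str.len user = PySem.Str.len b &&
      (b.toList.zip user.toList).all (fun p => p.1 = '*' || p.1 = p.2))

def solution_alt (user_id : List String) (banned_id : List String) : Int :=
  let valid := user_id.filter (fun u => matchesB banned_id u)
  ((PySem.Set.ofList ((PySem.List.combinations valid banned_id.length).map
      (fun c => PySem.List.sorted (PySem.Set.ofList c) (fun x => x) false))).length : Int)

-- ===== PRECONDITION & SPEC =====
def Spec_solution (user_id : List String) (banned_id : List String) (out : Int) : Prop := out = solution_alt user_id banned_id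
instance (user_id : List String) (banned_id : List String) (out : Int) : Decidable (Spec_solution user_id banned_id out) := by unfold Spec_solution; infer_instance

-- ===== CLAIM (what is proved, stated in full; the proofs are below) =====
def Claim_equal_solution : Prop := ∀ (user_id : List String) (banned_id : List String), Dom_solution user_id banned_id → Spec_solution user_id banned_id (solution user_id banned_id)

-- ===== LEMMAS AND PROOFS =====

-- the two pattern matchers agree
theorem checkInner_eq_zip (b u : List Char) :
    checkInnerA b u = (b.zip u).all (fun p => p.1 = '*' || p.1 = p.2) := by
  induction b generalizing u with
  | nil => simp [checkInnerA]
  | cons bc bs ih =>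
      cases u with
      | nil => simp [checkInnerA]
      | cons uc us =>
          by_cases h1 : bc = '*'
          · simp [checkInnerA, h1, ih]
          · by_cases h2 : bc = uc <;> simp [checkInnerA, h1, h2, ih]

theorem check_eq_matches (banned_id : List String) (u : String) :
    checkIsBanned banned_id u = matchesB banned_id u := by
  induction banned_id with
  | nil => simp [checkIsBanned, matchesB]
  | cons b rest ih =>
      by_cases h : u.length = b.length
      · by_cases h2 : ((b.toList.zip u.toList).all fun p => decide (p.1 = '*') || decide (p.1 = p.2)) = true
        · simp [checkIsBanned, matchesB, checkInner_eq_zip, h2, PySem.Str.len_eq, h]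
        · simp [checkIsBanned, matchesB, checkInner_eq_zip, h2, PySem.Str.len_eq, h, ih]
      · simp [checkIsBanned, matchesB, checkInner_eq_zip, PySem.Str.len_eq, h, ih]

-- filtering the all-valid combinations = combinations of the filtered list
theorem filter_combinations {α : Type} (p : α → Bool) (l : List α) (k : Nat) :
    (PySem.List.combinations l k).filter (fun c => c.all p)
      = PySem.List.combinations (l.filter p) k := by
  induction l generalizing k with
  | nil => cases k <;> simp [PySem.List.combinations_zero, PySem.List.combinations_nil_succ]
  | cons x xs ih =>
      cases k with
      | zero => simp [PySem.List.combinations_zero]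
      | succ r =>
          rw [PySem.List.combinations_cons_succ, List.filter_append, List.filter_map]
          by_cases hx : p x
          · rw [List.filter_cons_of_pos hx, PySem.List.combinations_cons_succ, ← ih, ← ih]
            congr 1
            congr 1
            apply List.filter_congr
            intro c _
            simp [Function.comp, hx]
          · rw [List.filter_cons_of_neg hx, ← ih]
            have h0 : List.filter ((fun c => c.all p) ∘ (fun c => x :: c)) (PySem.List.combinations xs r) = [] := by
              rw [List.filter_eq_nil_iff]
              intro c _
              simp [Function.comp, hx]
            rw [h0]
            simp

-- canonical form: two Nodup lists are equal as sets iff their sorted forms are equal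
theorem equal_iff_sorted {s t : List String} (hs : s.Nodup) (ht : t.Nodup) :
    PySem.Set.equal s t = true ↔
      PySem.List.sorted s (fun x => x) false = PySem.List.sorted t (fun x => x) false := by
  rw [PySem.Set.equal_iff, PySem.List.sorted_id_eq_sorted_id_iff_perm,
    List.perm_ext_iff_of_nodup hs ht]

-- A's dedup fold counts the distinct canonical forms
theorem dedup_fold (cs : List (List String)) (bl : List (PySem.Set String))
    (hb : ∀ s ∈ bl, s.Nodup)
    (hnd : (bl.map (fun s => PySem.List.sorted s (fun x => x) false)).Nodup) :
    (cs.foldl (fun bl c =>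
        let users : PySem.Set String := PySem.Set.ofList c
        if bl.any (fun s => PySem.Set.equal s users) then bl else bl ++ [users]) bl).length
      = (PySem.Set.update (bl.map (fun s => PySem.List.sorted s (fun x => x) false))
          (cs.map (fun c => PySem.List.sorted (PySem.Set.ofList c) (fun x => x) false))).length := by
  induction cs generalizing bl with
  | nil => simp [PySem.Set.update]
  | cons c cs ih =>
      have hmemiff : (bl.any fun s => PySem.Set.equal s (PySem.Set.ofList c)) = true ↔
          PySem.List.sorted (PySem.Set.ofList c) (fun x => x) false
            ∈ bl.map (fun s => PySem.List.sorted s (fun x => x) false) := by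
        rw [List.any_eq_true]
        constructor
        · rintro ⟨s, hs, hse⟩
          exact List.mem_map.mpr ⟨s, hs,
            ((equal_iff_sorted (hb s hs) (PySem.Set.nodup_ofList _)).mp hse).symm ▸ rfl⟩
        · rintro hm
          rcases List.mem_map.mp hm with ⟨s, hs, hse⟩
          exact ⟨s, hs, (equal_iff_sorted (hb s hs) (PySem.Set.nodup_ofList _)).mpr hse⟩
      simp only [List.foldl_cons, List.map_cons, PySem.Set.update_cons]
      by_cases hc : (bl.any fun s => PySem.Set.equal s (PySem.Set.ofList c)) = true
      · rw [if_pos hc, PySem.Set.add_of_mem (hmemiff.mp hc)]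
        exact ih bl hb hnd
      · have hnm := fun h => hc (hmemiff.mpr h)
        rw [if_neg hc, PySem.Set.add_of_not_mem hnm]
        have := ih (bl ++ [PySem.Set.ofList c])
          (by intro s hs
              rcases List.mem_append.mp hs with h | h
              · exact hb s h
              · simp at h; subst h; exact (PySem.Set.nodup_ofList _))
          (by rw [List.map_append]
              exact List.Nodup.append hnd (by simp)
                (by intro x hx hx2; simp at hx2; subst hx2; exact hnm hx))
        rw [this, List.map_append]
        simp

-- ===== VERDICT (by name: the statement is the Claim_ definition above) =====
theorem solution_spec : Claim_equal_solution := by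
  intro user_id banned_id _
  unfold Spec_solution
  simp only [solution, solution_alt, check_eq_matches]
  rw [← List.foldl_filter, filter_combinations]
  rw [dedup_fold _ [] (by simp) (by simp)]
  simp [PySem.Set.update, ← PySem.Set.ofList_eq_foldl]
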